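-- pv_equiv track=rewrite | github.com/zeronounours/ictf-2015-writeups | analyses/gdps/gdps.py | decompose_recv
-- ===== SOURCE A (Python) =====
-- def xor_with_secret(message,key) :
--  counter = 0
--  length = len(message)
--  xored_message = ""
--  for i in range(0, length) :
--    xored_message += chr(ord(message[counter]) ^ ord(key[counter]))
--    counter += 1
--  return xored_message
--
-- def decompose_recv(message,key) :
--   if len(message) != 0 :
--      first_message_length = ord(message[3])+256*ord(message[2])+256*256*ord(message[1])+256*256*256*ord(message[0])
--      first_message = message[4:4+first_message_length]
--      rest = message[4+first_message_length:]
--      decoded_message = ""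
--      decoded_message += xor_with_secret(first_message,key)
--      decoded_message += decompose_recv(rest,key)
--      return decoded_message
--   else :
--      return ""
-- ===== SOURCE B (Python) =====
-- def decompose_recv(message, key):
--     parts = []
--     rest = message
--     while rest:
--         n = (((ord(rest[0]) * 256 + ord(rest[1])) * 256 + ord(rest[2])) * 256 + ord(rest[3]))
--         parts.append(''.join(chr(ord(c) ^ ord(key[j])) for j, c in enumerate(rest[4:4 + n])))
--         rest = rest[4 + n:]
--     return ''.join(parts)
-- ===== Notes on version B (the rewrite author's own statement) =====
-- stated objective: simpler
-- what changed: Replaces the recursion on the remaining suffix (with a counter-based XOR helper and per-char string concatenation) by a single iterative while-loop that walks the message, decodes each length-prefixed segment via enumerate-indexed XOR into a parts list joined once at the end; the header is read in Horner form.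
import Mathlib
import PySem

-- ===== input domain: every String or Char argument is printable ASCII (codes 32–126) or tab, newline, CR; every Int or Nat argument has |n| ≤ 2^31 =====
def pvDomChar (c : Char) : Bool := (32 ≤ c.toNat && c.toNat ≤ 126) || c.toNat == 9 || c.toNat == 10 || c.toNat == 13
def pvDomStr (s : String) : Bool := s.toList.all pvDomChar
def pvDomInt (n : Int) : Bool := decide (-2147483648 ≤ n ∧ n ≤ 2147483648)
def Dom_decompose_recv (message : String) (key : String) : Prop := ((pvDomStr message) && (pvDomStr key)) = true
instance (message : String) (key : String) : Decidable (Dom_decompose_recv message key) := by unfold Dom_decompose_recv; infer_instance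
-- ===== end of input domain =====

-- B replaces A's recursion-on-the-suffix (with a counter-based XOR helper and string +=)
-- by one iterative loop collecting decoded parts and joining once; return values proved equal on Pre_.

-- ===== PORT A =====
-- xor_with_secret: for i in range(0, length) with a counter, building the string by +=
def pvXorLoopA (message key : List Char) : List Int → Int → List Char → Option (List Char)
  | [], _, acc => some acc
  | _ :: is, counter, acc =>
    match PySem.List.pyGet? message counter, PySem.List.pyGet? key counter with
    | some m, some k => pvXorLoopA message key is (counter + 1) (acc ++ [Char.ofNat (m.toNat ^^^ k.toNat)])
    | _, _ => none

def pvXorWithSecretA (message key : List Char) : Option (List Char) :=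
  pvXorLoopA message key (PySem.List.pyRange 0 message.length 1) 0 []

-- recursion of A, with fuel as a totality guard only (one unit per recursive call;
-- each call strictly shortens the message, so message.length + 1 units never run out)
def pvDecomposeA (key : List Char) : Nat → List Char → Option (List Char)
  | fuel, message =>
    if message.length ≠ 0 then
      match fuel with
      | 0 => none
      | fuel' + 1 =>
        match PySem.List.pyGet? message 3, PySem.List.pyGet? message 2,
              PySem.List.pyGet? message 1, PySem.List.pyGet? message 0 with
        | some c3, some c2, some c1, some c0 =>
          let firstLen : Int :=
            (c3.toNat : Int) + 256 * (c2.toNat : Int) + 256 * 256 * (c1.toNat : Int)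
              + 256 * 256 * 256 * (c0.toNat : Int)
          let first := PySem.List.slice message (some 4) (some (4 + firstLen))
          let rest := PySem.List.slice message (some (4 + firstLen)) none
          match pvXorWithSecretA first key with
          | some d1 =>
            match pvDecomposeA key fuel' rest with
            | some d2 => some (d1 ++ d2)
            | none => none
          | none => none
        | _, _, _, _ => none
    else some []

def decompose_recv (message : String) (key : String) : String :=
  String.ofList ((pvDecomposeA key.toList (message.toList.length + 1) message.toList).getD [])

-- ===== PORT B =====
-- ''.join(chr(ord(c) ^ ord(key[j])) for j, c in enumerate(seg))
def pvXorSegB (key : List Char) : List (Int × Char) → Option (List Char)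
  | [] => some []
  | (j, c) :: rest =>
    match PySem.List.pyGet? key j with
    | some k =>
      match pvXorSegB key rest with
      | some t => some (Char.ofNat (c.toNat ^^^ k.toNat) :: t)
      | none => none
    | none => none

-- the while-loop over the remaining string, accumulating decoded parts
-- (fuel is a totality guard only; each iteration strictly shortens rest)
def pvLoopB (key : List Char) : Nat → List Char → List (List Char) → Option (List (List Char))
  | fuel, rest, parts =>
    if rest.isEmpty then some parts
    else
      match fuel with
      | 0 => none
      | fuel' + 1 =>
        match PySem.List.pyGet? rest 0, PySem.List.pyGet? rest 1,
              PySem.List.pyGet? rest 2, PySem.List.pyGet? rest 3 with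
        | some a, some b, some c, some d =>
          let n : Int :=
            (((a.toNat : Int) * 256 + (b.toNat : Int)) * 256 + (c.toNat : Int)) * 256 + (d.toNat : Int)
          match pvXorSegB key (PySem.List.enumerate (PySem.List.slice rest (some 4) (some (4 + n)))) with
          | some seg => pvLoopB key fuel' (PySem.List.slice rest (some (4 + n)) none) (parts ++ [seg])
          | none => none
        | _, _, _, _ => none

def decompose_recv_alt (message : String) (key : String) : String :=
  String.ofList ((pvLoopB key.toList (message.toList.length + 1) message.toList []).getD []).flatten

-- ===== PRECONDITION & SPEC =====
-- Pre_ excludes exactly the inputs on which A raises IndexError: a message that does not parse as a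
-- sequence of 4-byte big-endian length-prefixed frames (a trailing frame with a truncated header),
-- or one of whose frame payloads is longer than the key.  pvWFb is that grammar check on the input.
-- (the Nat bound is only a structural-recursion guard: each frame consumes at least 4 characters,
--  so message.length steps always suffice; pvWFbAux_irrel below shows the bound is irrelevant)
def pvWFbAux (key : List Char) : Nat → List Char → Bool
  | _, [] => true
  | 0, _ :: _ => false
  | f + 1, c0 :: c1 :: c2 :: c3 :: t =>
    (decide ((t.take (c3.toNat + 256 * c2.toNat + 256 * 256 * c1.toNat
        + 256 * 256 * 256 * c0.toNat)).length ≤ key.length))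
      && pvWFbAux key f (t.drop (c3.toNat + 256 * c2.toNat + 256 * 256 * c1.toNat
        + 256 * 256 * 256 * c0.toNat))
  | _ + 1, [_] => false
  | _ + 1, [_, _] => false
  | _ + 1, [_, _, _] => false

def pvWFb (key : List Char) (msg : List Char) : Bool := pvWFbAux key msg.length msg

def Pre_decompose_recv (message : String) (key : String) : Prop :=
  pvWFb key.toList message.toList = true

instance (message : String) (key : String) : Decidable (Pre_decompose_recv message key) := by
  unfold Pre_decompose_recv; infer_instance

def pvWitness_decompose_recv : String × String := ("\t\t\t\tAB", "ab")

def Spec_decompose_recv (message : String) (key : String) (out : String) : Prop := out = decompose_recv_alt message key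
instance (message : String) (key : String) (out : String) : Decidable (Spec_decompose_recv message key out) := by unfold Spec_decompose_recv; infer_instance

-- ===== CLAIM (what is proved, stated in full; the proofs are below) =====
def Claim_equal_decompose_recv : Prop := ∀ (message : String) (key : String), Dom_decompose_recv message key → Pre_decompose_recv message key → Spec_decompose_recv message key (decompose_recv message key)

-- ===== LEMMAS AND PROOFS =====

-- the common value both XOR routines compute
def pvZipXor (seg ks : List Char) : List Char :=
  List.zipWith (fun m k => Char.ofNat (m.toNat ^^^ k.toNat)) seg ks

-- the decoded segments of a well-formed message (proof-side specification)
def pvSegs (key : List Char) : List Char → List (List Char)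
  | [] => []
  | c0 :: c1 :: c2 :: c3 :: t =>
    pvZipXor (t.take (c3.toNat + 256 * c2.toNat + 256 * 256 * c1.toNat
        + 256 * 256 * 256 * c0.toNat)) key
      :: pvSegs key (t.drop (c3.toNat + 256 * c2.toNat + 256 * 256 * c1.toNat
        + 256 * 256 * 256 * c0.toNat))
  | [_] => []
  | [_, _] => []
  | [_, _, _] => []
termination_by msg => msg.length
decreasing_by simp; omega

theorem pvXorSegB_spec (ks : List Char) : ∀ (seg : List Char) (j : Nat),
    j + seg.length ≤ ks.length →
    pvXorSegB ks (PySem.List.enumerate seg (j : Int)) = some (pvZipXor seg (ks.drop j))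
  | [], j, h => by simp [PySem.List.enumerate_nil, pvXorSegB, pvZipXor]
  | c :: cs, j, h => by
    have hj : j < ks.length := by simp at h; omega
    have hcast : ((j : Int) + 1) = ((j + 1 : Nat) : Int) := by push_cast; ring
    rw [PySem.List.enumerate_cons, hcast]
    have ih := pvXorSegB_spec ks cs (j + 1) (by simp at h ⊢; omega)
    have hdrop : ks.drop j = ks[j] :: ks.drop (j + 1) := List.drop_eq_getElem_cons hj
    rw [hdrop]
    simp only [pvXorSegB, PySem.List.pyGet?_natCast, List.getElem?_eq_getElem hj, ih, pvZipXor,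
      List.zipWith_cons_cons]

theorem pvXorLoopA_spec (seg ks : List Char) : ∀ (is : List Int) (cnt : Nat) (acc : List Char),
    cnt + is.length = seg.length → seg.length ≤ ks.length →
    pvXorLoopA seg ks is (cnt : Int) acc = some (acc ++ pvZipXor (seg.drop cnt) (ks.drop cnt))
  | [], cnt, acc, hlen, hks => by
    have : seg.length ≤ cnt := by simp at hlen; omega
    simp [pvXorLoopA, List.drop_eq_nil_of_le this, pvZipXor]
  | _ :: is, cnt, acc, hlen, hks => by
    have hc : cnt < seg.length := by simp at hlen; omega
    have hck : cnt < ks.length := by omega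
    have hcast : ((cnt : Int) + 1) = ((cnt + 1 : Nat) : Int) := by push_cast; ring
    have ih := pvXorLoopA_spec seg ks is (cnt + 1) (acc ++ [Char.ofNat (seg[cnt].toNat ^^^ ks[cnt].toNat)]) (by simp at hlen ⊢; omega) hks
    have hds : seg.drop cnt = seg[cnt] :: seg.drop (cnt + 1) := List.drop_eq_getElem_cons hc
    have hdk : ks.drop cnt = ks[cnt] :: ks.drop (cnt + 1) := List.drop_eq_getElem_cons hck
    rw [pvXorLoopA, PySem.List.pyGet?_natCast, PySem.List.pyGet?_natCast,
        List.getElem?_eq_getElem hc, List.getElem?_eq_getElem hck, hds, hdk]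
    simp only [hcast, ih, pvZipXor, List.zipWith_cons_cons, List.append_assoc, List.singleton_append]

theorem pvXorWithSecretA_spec (seg ks : List Char) (h : seg.length ≤ ks.length) :
    pvXorWithSecretA seg ks = some (pvZipXor seg ks) := by
  have := pvXorLoopA_spec seg ks (PySem.List.pyRange 0 seg.length 1) 0 [] (by
    simp [PySem.List.length_pyRange_one]) h
  simpa [pvXorWithSecretA] using this

-- the bound in pvWFb is irrelevant as long as it covers the message length
theorem pvWFbAux_irrel (key : List Char) : ∀ (f : Nat) (msg : List Char) (g : Nat),
    msg.length ≤ f → msg.length ≤ g → pvWFbAux key f msg = pvWFbAux key g msg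
  | _, [], g, _, _ => by cases g <;> simp [pvWFbAux]
  | 0, _ :: _, _, hf, _ => by simp at hf
  | _ + 1, _ :: _, 0, _, hg => by simp at hg
  | f + 1, c0 :: c1 :: c2 :: c3 :: t, g + 1, hf, hg => by
    have h := List.length_drop (l := t)
        (i := c3.toNat + 256 * c2.toNat + 256 * 256 * c1.toNat + 256 * 256 * 256 * c0.toNat)
    simp only [List.length_cons] at hf hg
    rw [pvWFbAux, pvWFbAux,
      pvWFbAux_irrel key f (t.drop _) g (by omega) (by omega)]
  | _ + 1, [_], _ + 1, _, _ => by simp [pvWFbAux]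
  | _ + 1, [_, _], _ + 1, _, _ => by simp [pvWFbAux]
  | _ + 1, [_, _, _], _ + 1, _, _ => by simp [pvWFbAux]

theorem pvWFb_cons4 (key : List Char) (c0 c1 c2 c3 : Char) (t : List Char) :
    pvWFb key (c0 :: c1 :: c2 :: c3 :: t) =
      ((decide ((t.take (c3.toNat + 256 * c2.toNat + 256 * 256 * c1.toNat
          + 256 * 256 * 256 * c0.toNat)).length ≤ key.length))
        && pvWFb key (t.drop (c3.toNat + 256 * c2.toNat + 256 * 256 * c1.toNat
          + 256 * 256 * 256 * c0.toNat))) := by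
  have h := List.length_drop (l := t)
      (i := c3.toNat + 256 * c2.toNat + 256 * 256 * c1.toNat + 256 * 256 * 256 * c0.toNat)
  unfold pvWFb
  rw [show (c0 :: c1 :: c2 :: c3 :: t).length = t.length + 3 + 1 by simp, pvWFbAux,
    pvWFbAux_irrel key (t.length + 3) (t.drop _) (t.drop _).length (by omega) le_rfl]

-- A's recursion computes the flattened segments of a well-formed message
theorem pvDecomposeA_spec (key : List Char) : ∀ (fuel : Nat) (msg : List Char),
    msg.length < fuel → pvWFb key msg = true →
    pvDecomposeA key fuel msg = some (pvSegs key msg).flatten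
  | fuel, [], _, _ => by rw [pvDecomposeA.eq_def]; simp [pvSegs]
  | 0, _ :: _, hf, _ => by simp at hf
  | _ + 1, [_], _, hwf => by simp [pvWFb, pvWFbAux] at hwf
  | _ + 1, [_, _], _, hwf => by simp [pvWFb, pvWFbAux] at hwf
  | _ + 1, [_, _, _], _, hwf => by simp [pvWFb, pvWFbAux] at hwf
  | fuel' + 1, c0 :: c1 :: c2 :: c3 :: t, hf, hwf => by
    rw [pvWFb_cons4] at hwf
    simp only [Bool.and_eq_true, decide_eq_true_eq] at hwf
    obtain ⟨hkey, hwf'⟩ := hwf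
    set LN : Nat := c3.toNat + 256 * c2.toNat + 256 * 256 * c1.toNat
        + 256 * 256 * 256 * c0.toNat with hLN
    have hget3 : PySem.List.pyGet? (c0::c1::c2::c3::t) 3 = some c3 := by
      rw [show (3:ℤ) = ((3:ℕ):ℤ) from rfl, PySem.List.pyGet?_natCast]; rfl
    have hget2 : PySem.List.pyGet? (c0::c1::c2::c3::t) 2 = some c2 := by
      rw [show (2:ℤ) = ((2:ℕ):ℤ) from rfl, PySem.List.pyGet?_natCast]; rfl
    have hget1 : PySem.List.pyGet? (c0::c1::c2::c3::t) 1 = some c1 := by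
      rw [show (1:ℤ) = ((1:ℕ):ℤ) from rfl, PySem.List.pyGet?_natCast]; rfl
    have hget0 : PySem.List.pyGet? (c0::c1::c2::c3::t) 0 = some c0 := by
      rw [show (0:ℤ) = ((0:ℕ):ℤ) from rfl, PySem.List.pyGet?_natCast]; rfl
    have hLI : (c3.toNat : Int) + 256 * (c2.toNat : Int) + 256 * 256 * (c1.toNat : Int)
        + 256 * 256 * 256 * (c0.toNat : Int) = ((LN : Nat) : Int) := by
      rw [hLN]; push_cast; ring
    have hfirst : PySem.List.slice (c0::c1::c2::c3::t) (some 4) (some (4 + ((LN : Nat) : Int)))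
        = t.take LN := by
      rw [show (4 : Int) = ((4 : Nat) : Int) from rfl, show ((4:Nat):Int) + ((LN:Nat):Int) = ((4 + LN : Nat) : Int) by push_cast; ring,
        PySem.List.slice_natCast]
      simp
    have hrest : PySem.List.slice (c0::c1::c2::c3::t) (some (4 + ((LN : Nat) : Int))) none
        = t.drop LN := by
      rw [show (4:Int) + ((LN:Nat):Int) = ((LN + 4 : Nat) : Int) by push_cast; ring,
        PySem.List.slice_from_natCast]
      simp
    have hxor := pvXorWithSecretA_spec (t.take LN) key hkey
    have hfl : (t.drop LN).length < fuel' := by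
      have := List.length_drop (l := t) (i := LN); simp at hf; omega
    have ih := pvDecomposeA_spec key fuel' (t.drop LN) hfl hwf'
    rw [pvDecomposeA.eq_def]
    simp only [List.length_cons, hget3, hget2, hget1, hget0, hLI, hfirst, hrest, hxor, ih]
    simp [pvSegs, ← hLN]

-- B's loop appends exactly the decoded segments to the accumulator
theorem pvLoopB_spec (key : List Char) : ∀ (fuel : Nat) (msg : List Char) (parts : List (List Char)),
    msg.length < fuel → pvWFb key msg = true →
    pvLoopB key fuel msg parts = some (parts ++ pvSegs key msg)
  | fuel, [], parts, _, _ => by rw [pvLoopB.eq_def]; simp [pvSegs]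
  | 0, _ :: _, _, hf, _ => by simp at hf
  | _ + 1, [_], _, _, hwf => by simp [pvWFb, pvWFbAux] at hwf
  | _ + 1, [_, _], _, _, hwf => by simp [pvWFb, pvWFbAux] at hwf
  | _ + 1, [_, _, _], _, _, hwf => by simp [pvWFb, pvWFbAux] at hwf
  | fuel' + 1, c0 :: c1 :: c2 :: c3 :: t, parts, hf, hwf => by
    rw [pvWFb_cons4] at hwf
    simp only [Bool.and_eq_true, decide_eq_true_eq] at hwf
    obtain ⟨hkey, hwf'⟩ := hwf
    set LN : Nat := c3.toNat + 256 * c2.toNat + 256 * 256 * c1.toNat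
        + 256 * 256 * 256 * c0.toNat with hLN
    have hget0 : PySem.List.pyGet? (c0::c1::c2::c3::t) 0 = some c0 := by
      rw [show (0:ℤ) = ((0:ℕ):ℤ) from rfl, PySem.List.pyGet?_natCast]; rfl
    have hget1 : PySem.List.pyGet? (c0::c1::c2::c3::t) 1 = some c1 := by
      rw [show (1:ℤ) = ((1:ℕ):ℤ) from rfl, PySem.List.pyGet?_natCast]; rfl
    have hget2 : PySem.List.pyGet? (c0::c1::c2::c3::t) 2 = some c2 := by
      rw [show (2:ℤ) = ((2:ℕ):ℤ) from rfl, PySem.List.pyGet?_natCast]; rfl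
    have hget3 : PySem.List.pyGet? (c0::c1::c2::c3::t) 3 = some c3 := by
      rw [show (3:ℤ) = ((3:ℕ):ℤ) from rfl, PySem.List.pyGet?_natCast]; rfl
    have hLI : (((c0.toNat : Int) * 256 + (c1.toNat : Int)) * 256 + (c2.toNat : Int)) * 256
        + (c3.toNat : Int) = ((LN : Nat) : Int) := by
      rw [hLN]; push_cast; ring
    have hfirst : PySem.List.slice (c0::c1::c2::c3::t) (some 4) (some (4 + ((LN : Nat) : Int)))
        = t.take LN := by
      rw [show (4 : Int) = ((4 : Nat) : Int) from rfl, show ((4:Nat):Int) + ((LN:Nat):Int) = ((4 + LN : Nat) : Int) by push_cast; ring,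
        PySem.List.slice_natCast]
      simp
    have hrest : PySem.List.slice (c0::c1::c2::c3::t) (some (4 + ((LN : Nat) : Int))) none
        = t.drop LN := by
      rw [show (4:Int) + ((LN:Nat):Int) = ((LN + 4 : Nat) : Int) by push_cast; ring,
        PySem.List.slice_from_natCast]
      simp
    have hxor := pvXorSegB_spec key (t.take LN) 0 (by simpa using hkey)
    simp only [Nat.cast_zero, List.drop_zero] at hxor
    have hfl : (t.drop LN).length < fuel' := by
      have := List.length_drop (l := t) (i := LN); simp at hf; omega
    have ih := pvLoopB_spec key fuel' (t.drop LN) (parts ++ [pvZipXor (t.take LN) key]) hfl hwf'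
    rw [pvLoopB.eq_def]
    simp only [List.isEmpty_cons, Bool.false_eq_true, if_false, hget0, hget1, hget2, hget3, hLI,
      hfirst, hrest, hxor, ih]
    simp [pvSegs, ← hLN]

-- ===== VERDICT (by name: the statement is the Claim_ definition above) =====
theorem decompose_recv_spec : Claim_equal_decompose_recv := by
  unfold Claim_equal_decompose_recv
  intro message key _hdom hpre
  unfold Spec_decompose_recv decompose_recv decompose_recv_alt
  rw [pvDecomposeA_spec key.toList _ _ (Nat.lt_succ_self _) hpre,
      pvLoopB_spec key.toList _ _ [] (Nat.lt_succ_self _) hpre]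
  simp
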